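-- pv_equiv track=rewrite | github.com/raymondhe0/Macro_AI_Lab | scripts/macro_analyst.py | build_sources_md
-- ===== SOURCE A (Python) =====
-- def build_sources_md(news_items: list[dict]) -> str:
--     lines = ["\n---\n### 参考来源 · Sources\n"]
--     seen = set()
--     count = 0
--     for item in news_items:
--         url   = item.get("link", "")
--         title = item.get("title", url)
--         src   = item.get("source", "")
--         date  = item.get("date", "")
--         if not url or url in seen:
--             continue
--         seen.add(url)
--         meta = " · ".join(filter(None, [src, date]))
--         lines.append(f"- [{title}]({url}){' — ' + meta if meta else ''}")
--         count += 1
--         if count >= 15: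
--             break
--     return "\n".join(lines)
-- ===== SOURCE B (Python) =====
-- def build_sources_md(news_items: list[dict]) -> str:
--     # Dedup by the classic "nub" scheme: keep the head, then delete every later
--     # item carrying the same url from the remainder before continuing (no seen-set).
--     unique = []
--     remaining = list(news_items)
--     while remaining:
--         head = remaining.pop(0)
--         url = head.get("link", "")
--         if url:
--             unique.append(head)
--             remaining = [x for x in remaining if x.get("link", "") != url]
--
--     body = []
--     for item in unique[:15]:
--         url = item.get("link", "")
--         title = item.get("title", url)
--         meta = " · ".join(filter(None, [item.get("source", ""), item.get("date", "")]))
--         body.append(f"- [{title}]({url})" + (f" — {meta}" if meta else ""))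
--     return "\n".join(["\n---\n### 参考来源 · Sources\n"] + body)
-- ===== Notes on version B (the rewrite author's own statement) =====
-- stated objective: alternative
-- what changed: A's single seen-set loop with a running count and break is replaced by a nub-style dedup that keeps each head and deletes all later items with the same url from the remainder (no seen set, no counter), followed by a [:15] slice and a separate formatting pass.
import Mathlib
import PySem

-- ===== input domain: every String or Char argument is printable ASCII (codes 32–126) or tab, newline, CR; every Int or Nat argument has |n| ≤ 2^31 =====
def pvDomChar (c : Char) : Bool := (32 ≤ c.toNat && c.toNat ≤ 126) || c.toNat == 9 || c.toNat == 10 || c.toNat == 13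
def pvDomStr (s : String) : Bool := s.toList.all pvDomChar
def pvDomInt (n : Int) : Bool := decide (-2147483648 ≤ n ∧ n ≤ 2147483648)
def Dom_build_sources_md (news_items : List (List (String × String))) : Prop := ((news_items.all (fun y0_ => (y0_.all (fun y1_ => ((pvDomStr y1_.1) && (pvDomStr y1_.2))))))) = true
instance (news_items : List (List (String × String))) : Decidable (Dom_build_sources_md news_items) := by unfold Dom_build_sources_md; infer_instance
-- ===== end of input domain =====

-- B replaces A's seen-set/counter/break loop by a nub-style dedup (keep the head, delete later
-- items with its url from the remainder), then a [:15] slice and a separate formatting pass;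
-- objective: alternative decomposition, same results.

-- ===== PORT A =====
-- A's loop: state = (lines, seen, count); break when count reaches 15.
def buildA_loop : List (List (String × String)) → List String → PySem.Set String → Int → List String
  | [], lines, _seen, _count => lines
  | item :: rest, lines, seen, count =>
    let url := (PySem.Dict.mk item).getD "link" ""
    let title := (PySem.Dict.mk item).getD "title" url
    let src := (PySem.Dict.mk item).getD "source" ""
    let date := (PySem.Dict.mk item).getD "date" ""
    if url == "" || PySem.Set.contains seen url then
      buildA_loop rest lines seen count
    else
      let seen' := PySem.Set.add seen url
      let meta0 := PySem.Str.join " · " (([src, date]).filter (fun s => !(s == "")))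
      let line := "- [" ++ title ++ "](" ++ url ++ ")" ++ (if !(meta0 == "") then " — " ++ meta0 else "")
      let lines' := lines ++ [line]
      let count' := count + 1
      if count' ≥ 15 then lines' else buildA_loop rest lines' seen' count'

def build_sources_md (news_items : List (List (String × String))) : String :=
  PySem.Str.join "\n" (buildA_loop news_items ["\n---\n### 参考来源 · Sources\n"] PySem.Set.empty 0)

-- ===== PORT B =====
def bUrl (item : List (String × String)) : String := (PySem.Dict.mk item).getD "link" ""

-- nub: keep the head (if its url is non-empty), filter its url out of the remainder, recurse
def bNub : List (List (String × String)) → List (List (String × String))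
  | [] => []
  | head :: remaining =>
    let url := bUrl head
    if url == "" then bNub remaining
    else head :: bNub (remaining.filter (fun x => !(bUrl x == url)))
termination_by l => l.length
decreasing_by
  · simp
  · have h1 := List.length_filter_le (fun x => !(bUrl x.1 == bUrl head)) remaining.attach
    simp at h1 ⊢; omega

-- formatting pass over one retained item
def bFmt (item : List (String × String)) : String :=
  let url := bUrl item
  let title := (PySem.Dict.mk item).getD "title" url
  let meta0 := PySem.Str.join " · "
    (([(PySem.Dict.mk item).getD "source" "", (PySem.Dict.mk item).getD "date" ""]).filter (fun s => !(s == "")))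
  "- [" ++ title ++ "](" ++ url ++ ")" ++ (if !(meta0 == "") then " — " ++ meta0 else "")

def build_sources_md_alt (news_items : List (List (String × String))) : String :=
  PySem.Str.join "\n"
    ("\n---\n### 参考来源 · Sources\n" :: (PySem.List.slice (bNub news_items) none (some 15)).map bFmt)

-- ===== PRECONDITION & SPEC =====
def Spec_build_sources_md (news_items : List (List (String × String))) (out : String) : Prop := out = build_sources_md_alt news_items
instance (news_items : List (List (String × String))) (out : String) : Decidable (Spec_build_sources_md news_items out) := by unfold Spec_build_sources_md; infer_instance

-- ===== CLAIM (what is proved, stated in full; the proofs are below) =====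
def Claim_equal_build_sources_md : Prop := ∀ (news_items : List (List (String × String))), Dom_build_sources_md news_items → Spec_build_sources_md news_items (build_sources_md news_items)

-- ===== LEMMAS AND PROOFS =====

-- main invariant: A's loop on rest with state (seen, n) equals lines ++ the formatted
-- (15-n)-window of B's nub applied to rest with seen's urls filtered away
theorem pvMain (rest : List (List (String × String))) (seen : PySem.Set String)
    (lines : List String) (n : Nat) (hn : n < 15)
    (hempty : PySem.Set.contains seen "" = false) :
    buildA_loop rest lines seen (n : Int) =
      lines ++ ((bNub (rest.filter (fun x => !(PySem.Set.contains seen (bUrl x))))).take (15 - n)).map bFmt := by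
  induction rest generalizing seen lines n with
  | nil => simp [buildA_loop, bNub]
  | cons item rest ih =>
    simp only [buildA_loop, List.filter_cons]
    by_cases hz : ((PySem.Dict.mk item).getD "link" "" == "") = true
    · -- empty url: A skips; the filter keeps it but bNub drops it
      rw [if_pos (by simp [hz])]
      have hkeep : (!(PySem.Set.contains seen (bUrl item))) = true := by
        simp only [bUrl]; rw [show (PySem.Dict.mk item).getD "link" "" = "" from by simpa using hz, hempty]; rfl
      rw [if_pos hkeep]
      have hnub : bNub (item :: rest.filter (fun x => !(PySem.Set.contains seen (bUrl x))))
          = bNub (rest.filter (fun x => !(PySem.Set.contains seen (bUrl x)))) := by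
        rw [bNub]; simp only [bUrl, hz]; rfl
      rw [hnub]; exact ih seen lines n hn hempty
    · by_cases hs : PySem.Set.contains seen ((PySem.Dict.mk item).getD "link" "") = true
      · -- url already seen: A skips; the filter drops it
        have hdrop : (!(PySem.Set.contains seen (bUrl item))) = false := by
          rw [show bUrl item = (PySem.Dict.mk item).getD "link" "" from rfl, hs]; rfl
        rw [if_pos (by rw [hs]; simp), if_neg (hdrop ▸ Bool.false_ne_true)]
        exact ih seen lines n hn hempty
      · -- new non-empty url: A emits
        have hzf : ((PySem.Dict.mk item).getD "link" "" == "") = false := eq_false_of_ne_true hz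
        have hcf : PySem.Set.contains seen ((PySem.Dict.mk item).getD "link" "") = false :=
          eq_false_of_ne_true hs
        have hkeepb : (!(PySem.Set.contains seen (bUrl item))) = true := by
          rw [show bUrl item = (PySem.Dict.mk item).getD "link" "" from rfl, hcf]; rfl
        rw [if_neg (by rw [hzf, hcf]; exact Bool.false_ne_true), if_pos hkeepb]
        set url := (PySem.Dict.mk item).getD "link" "" with hurl
        have hnub : bNub (item :: rest.filter (fun x => !(PySem.Set.contains seen (bUrl x))))
            = item :: bNub ((rest.filter (fun x => !(PySem.Set.contains seen (bUrl x)))).filter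
                (fun x => !(bUrl x == url))) := by
          rw [bNub]; simp only [← hurl, bUrl]
          rw [if_neg hz]
        have hfilter : (rest.filter (fun x => !(PySem.Set.contains seen (bUrl x)))).filter
              (fun x => !(bUrl x == url))
            = rest.filter (fun x => !(PySem.Set.contains (PySem.Set.add seen url) (bUrl x))) := by
          rw [List.filter_filter]
          apply List.filter_congr
          intro x _
          have : PySem.Set.contains (PySem.Set.add seen url) (bUrl x)
              = (PySem.Set.contains seen (bUrl x) || (bUrl x == url)) := by
            rw [Bool.eq_iff_iff]
            simp only [Bool.or_eq_true, beq_iff_eq]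
            rw [PySem.Set.contains_iff, PySem.Set.mem_add, PySem.Set.contains_iff]
          rw [this]; simp [Bool.and_comm]
        rw [hnub, hfilter]
        by_cases hcap : ((n : Int) + 1 >= 15)
        · -- this was the 15th unique url: A stops with lines ++ [line]; the window has length 1
          rw [if_pos hcap]
          have h14 : n = 14 := by omega
          rw [h14, show (15 - 14) = 0 + 1 from rfl, List.take_succ_cons, List.take_zero,
            List.map_cons, List.map_nil]
          simp only [bFmt, bUrl, List.filter_cons, List.filter_nil, hurl]
        · rw [if_neg hcap]
          have hn' : n + 1 < 15 := by omega
          have hempty' : PySem.Set.contains (PySem.Set.add seen url) "" = false := by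
            rw [show PySem.Set.contains (PySem.Set.add seen url) ""
                = (PySem.Set.contains seen "" || ("" == url)) from by
              rw [Bool.eq_iff_iff]
              simp only [Bool.or_eq_true, beq_iff_eq]
              rw [PySem.Set.contains_iff, PySem.Set.mem_add, PySem.Set.contains_iff]]
            rw [hempty, Bool.false_or]
            simp only [beq_eq_false_iff_ne]
            exact fun h => hz (by rw [← h]; rfl)
          have hrec := ih (PySem.Set.add seen url) (lines ++ [bFmt item]) (n + 1) hn' hempty'
          rw [show (((n + 1 : Nat)) : Int) = (n : Int) + 1 from by push_cast; ring] at hrec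
          rw [show (15 - n) = (15 - (n + 1)) + 1 from by omega, List.take_succ_cons, List.map_cons]
          simp only [bFmt, bUrl, List.filter_cons, List.filter_nil, hurl] at hrec ⊢
          rw [hrec]
          simp

-- ===== VERDICT (by name: the statement is the Claim_ definition above) =====
theorem build_sources_md_spec : Claim_equal_build_sources_md := by
  intro news_items _hdom
  unfold Spec_build_sources_md build_sources_md build_sources_md_alt
  have h := pvMain news_items PySem.Set.empty ["\n---\n### 参考来源 · Sources\n"] 0
    (by omega) rfl
  rw [show ((0 : Nat) : Int) = 0 from rfl] at h
  rw [h]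
  rw [show news_items.filter (fun x => !(PySem.Set.contains PySem.Set.empty (bUrl x)))
      = news_items from by
    apply List.filter_eq_self.mpr; intro x _; rfl]
  rw [PySem.List.slice_to _ (by norm_num : (0 : Int) ≤ 15)]
  simp
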